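-- pv_equiv track=rewrite | github.com/pypi-data/pypi-mirror-397 | packages/napari-tmidas/napari_tmidas-0.2.5.tar.gz/napari_tmidas-0.2.5/src/napari_tmidas/processing_functions/regionprops_analysis.py | parse_dimensions_from_shape
-- ===== SOURCE A (Python) =====
-- from typing import Dict, List, Optional, Tuple
--
-- def parse_dimensions_from_shape(
--     shape: Tuple[int, ...], ndim: int
-- ) -> Dict[str, int]:
--     """
--     Parse dimension information from image shape.
--
--     For images with more than 3 dimensions, tries to infer which dimensions
--     correspond to T (time), C (channel), Z (depth), Y (height), X (width).
--
--     Parameters: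
--     -----------
--     shape : Tuple[int, ...]
--         Shape of the image array
--     ndim : int
--         Number of dimensions
--
--     Returns:
--     --------
--     Dict[str, int]
--         Dictionary mapping dimension names to their sizes
--     """
--     dim_info = {}
--
--     if ndim == 2:
--         # YX
--         dim_info["Y"] = shape[0]
--         dim_info["X"] = shape[1]
--     elif ndim == 3:
--         # Assume ZYX (could also be TYX or CYX)
--         dim_info["Z"] = shape[0]
--         dim_info["Y"] = shape[1]
--         dim_info["X"] = shape[2]
--     elif ndim == 4:
--         # Assume TZYX or CZYX
--         dim_info["T"] = shape[0]
--         dim_info["Z"] = shape[1]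
--         dim_info["Y"] = shape[2]
--         dim_info["X"] = shape[3]
--     elif ndim == 5:
--         # Assume TCZYX
--         dim_info["T"] = shape[0]
--         dim_info["C"] = shape[1]
--         dim_info["Z"] = shape[2]
--         dim_info["Y"] = shape[3]
--         dim_info["X"] = shape[4]
--     else:
--         # For other dimensions, just number them
--         for i, size in enumerate(shape):
--             dim_info[f"dim_{i}"] = size
--
--     return dim_info
-- ===== SOURCE B (Python) =====
-- def parse_dimensions_from_shape(shape, ndim):
--     if not (2 <= ndim <= 5):
--         return {f"dim_{i}": size for i, size in enumerate(shape)}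
--     # pair the shape back-to-front with the canonical axis order X, Y, Z, (C), T,
--     # then reverse the pairs to restore front-to-back insertion order
--     axes = "XYZCT" if ndim == 5 else "XYZT"
--     pairs = []
--     for k in range(ndim):
--         pairs.append((axes[k], shape[ndim - 1 - k]))
--     return dict(reversed(pairs))
-- ===== Notes on version B (the rewrite author's own statement) =====
-- stated objective: simpler
-- what changed: Instead of A's per-rank if/elif chain of fixed assignments, B walks the shape back-to-front, pairing each trailing entry with the canonical axis order X,Y,Z,(C only at rank 5),T, then reverses the pairs into a dict; the numbered-dims fallback covers other ranks.
-- outside the precondition, e.g. on parse_dimensions_from_shape((1, 2), 3): A raises IndexError, B raises IndexError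
import Mathlib
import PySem

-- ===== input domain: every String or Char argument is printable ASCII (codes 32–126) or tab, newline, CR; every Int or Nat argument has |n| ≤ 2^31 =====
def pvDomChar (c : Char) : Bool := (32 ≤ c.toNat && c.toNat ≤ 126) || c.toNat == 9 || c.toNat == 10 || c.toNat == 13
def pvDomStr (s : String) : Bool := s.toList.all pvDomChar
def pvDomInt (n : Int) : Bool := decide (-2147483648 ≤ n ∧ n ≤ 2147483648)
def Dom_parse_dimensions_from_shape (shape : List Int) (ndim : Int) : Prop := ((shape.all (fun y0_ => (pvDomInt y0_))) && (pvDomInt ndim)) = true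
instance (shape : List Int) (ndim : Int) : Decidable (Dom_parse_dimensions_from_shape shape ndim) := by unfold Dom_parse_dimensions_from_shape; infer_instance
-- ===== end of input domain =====

-- B pairs the shape back-to-front with the canonical axis order X,Y,Z,(C),T and reverses,
-- instead of A's per-rank if/elif chain of assignments (objective: simpler).

-- ===== PORT A =====
-- shape[i]; on out-of-range Python raises IndexError (excluded by Pre_), .getD 0 is never reached there
def pvIdx (shape : List Int) (i : Int) : Int := (PySem.List.pyGet? shape i).getD 0

def parse_dimensions_from_shape (shape : List Int) (ndim : Int) : List (String × Int) :=
  let dim_info : PySem.Dict String Int := PySem.Dict.empty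
  (if ndim = 2 then
    (dim_info.insert "Y" (pvIdx shape 0)).insert "X" (pvIdx shape 1)
  else if ndim = 3 then
    ((dim_info.insert "Z" (pvIdx shape 0)).insert "Y" (pvIdx shape 1)).insert "X" (pvIdx shape 2)
  else if ndim = 4 then
    (((dim_info.insert "T" (pvIdx shape 0)).insert "Z" (pvIdx shape 1)).insert "Y" (pvIdx shape 2)).insert "X" (pvIdx shape 3)
  else if ndim = 5 then
    ((((dim_info.insert "T" (pvIdx shape 0)).insert "C" (pvIdx shape 1)).insert "Z" (pvIdx shape 2)).insert "Y" (pvIdx shape 3)).insert "X" (pvIdx shape 4)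
  else
    (PySem.List.enumerate shape).foldl (fun d p => d.insert ("dim_" ++ PySem.Int.toStr p.1) p.2) dim_info).items

-- ===== PORT B =====
-- axes[k]; k < ndim ≤ |axes| on the reached inputs, so the default is never used
def pvAxChar (axes : String) (k : Int) : String :=
  String.ofList [(PySem.Str.pyGet? axes k).getD ' ']

def parse_dimensions_from_shape_alt (shape : List Int) (ndim : Int) : List (String × Int) :=
  if ¬ (2 ≤ ndim ∧ ndim ≤ 5) then
    ((PySem.List.enumerate shape).foldl
      (fun (d : PySem.Dict String Int) (p : Int × Int) => d.insert ("dim_" ++ PySem.Int.toStr p.1) p.2)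
      PySem.Dict.empty).items
  else
    let axes : String := if ndim = 5 then "XYZCT" else "XYZT"
    let pairs : List (String × Int) :=
      (PySem.List.pyRange 0 ndim 1).foldl
        (fun acc k => acc ++ [(pvAxChar axes k, pvIdx shape (ndim - 1 - k))]) []
    (pairs.reverse.foldl
      (fun (d : PySem.Dict String Int) (p : String × Int) => d.insert p.1 p.2)
      PySem.Dict.empty).items

-- ===== PRECONDITION & SPEC =====
-- Pre_ excludes exactly the inputs where A raises IndexError: ndim in 2..5 with fewer than ndim entries in shape.
def Pre_parse_dimensions_from_shape (shape : List Int) (ndim : Int) : Prop :=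
  (2 ≤ ndim ∧ ndim ≤ 5) → ndim ≤ (shape.length : Int)
instance (shape : List Int) (ndim : Int) : Decidable (Pre_parse_dimensions_from_shape shape ndim) := by unfold Pre_parse_dimensions_from_shape; infer_instance
def pvWitness_parse_dimensions_from_shape : List Int × Int := ([7, 8, 9], 3)

def Spec_parse_dimensions_from_shape (shape : List Int) (ndim : Int) (out : List (String × Int)) : Prop := out = parse_dimensions_from_shape_alt shape ndim
instance (shape : List Int) (ndim : Int) (out : List (String × Int)) : Decidable (Spec_parse_dimensions_from_shape shape ndim out) := by unfold Spec_parse_dimensions_from_shape; infer_instance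

-- ===== CLAIM (what is proved, stated in full; the proofs are below) =====
def Claim_equal_parse_dimensions_from_shape : Prop := ∀ (shape : List Int) (ndim : Int), Dom_parse_dimensions_from_shape shape ndim → Pre_parse_dimensions_from_shape shape ndim → Spec_parse_dimensions_from_shape shape ndim (parse_dimensions_from_shape shape ndim)

-- ===== LEMMAS AND PROOFS =====

-- ===== VERDICT (by name: the statement is the Claim_ definition above) =====
theorem parse_dimensions_from_shape_spec : Claim_equal_parse_dimensions_from_shape := by
  intro shape ndim _ _
  unfold Spec_parse_dimensions_from_shape
  by_cases h2 : ndim = 2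
  · subst h2; rfl
  · by_cases h3 : ndim = 3
    · subst h3; rfl
    · by_cases h4 : ndim = 4
      · subst h4; rfl
      · by_cases h5 : ndim = 5
        · subst h5; rfl
        · have hn : ¬ (2 ≤ ndim ∧ ndim ≤ 5) := by
            rintro ⟨hl, hr⟩; interval_cases ndim <;> simp_all
          simp [parse_dimensions_from_shape, parse_dimensions_from_shape_alt,
                h2, h3, h4, h5, hn]
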